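-- pv_equiv track=rewrite | github.com/kgaurkar-d11/darwin | chronos/src/transformers/json_transformer.py | extract_nested_brackets
-- ===== SOURCE A (Python) =====
-- def extract_nested_brackets(s):
--     stack = []
--     results = []
--     for i, char in enumerate(s):
--         if char == '{':
--             stack.append(i)
--         elif char == '}' and stack:
--             start = stack.pop()
--             if not stack:
--                 results.append((start, i))
--     return results
-- ===== SOURCE B (Python) =====
-- def extract_nested_brackets(s):
--     def close_of(i, depth):
--         # index where the brace depth (starting as given) returns to 0, or None
--         while i < len(s):
--             if s[i] == '{':
--                 depth += 1
--             elif s[i] == '}':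
--                 depth -= 1
--                 if depth == 0:
--                     return i
--             i += 1
--         return None
--
--     results = []
--     pos = s.find('{')
--     while pos != -1:
--         end = close_of(pos + 1, 1)
--         if end is None:
--             break
--         results.append((pos, end))
--         pos = s.find('{', end + 1)
--     return results
-- ===== Notes on version B (the rewrite author's own statement) =====
-- stated objective: alternative
-- what changed: Instead of running one uniform per-character automaton that pushes/pops a stack of open-brace indices, B works in stages: it jumps to the next candidate open brace with str.find, runs a dedicated depth-count scan to locate that brace's matching close (stopping the whole search if there is none, since an unclosed open can never let A's stack empty again), records the pair, and resumes the find after the close.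
import Mathlib
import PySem

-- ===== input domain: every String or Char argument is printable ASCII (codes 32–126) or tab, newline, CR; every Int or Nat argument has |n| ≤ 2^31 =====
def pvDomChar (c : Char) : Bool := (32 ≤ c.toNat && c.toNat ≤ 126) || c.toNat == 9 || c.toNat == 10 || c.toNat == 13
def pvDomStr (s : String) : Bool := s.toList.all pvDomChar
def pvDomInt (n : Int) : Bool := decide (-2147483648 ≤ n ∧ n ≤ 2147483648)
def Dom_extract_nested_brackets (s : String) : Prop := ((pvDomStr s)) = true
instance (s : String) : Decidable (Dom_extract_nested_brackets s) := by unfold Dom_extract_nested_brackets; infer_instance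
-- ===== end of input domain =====

-- B replaces A's per-character stack automaton by staged scanning: find the next '{',
-- locate its matching '}' with a depth-count scan, emit the pair and resume after it
-- (objective: an alternative O(1)-extra-space decomposition of the same O(n) task).

-- ===== PORT A =====
-- one loop iteration of A: state = (stack of open indices, results)
def pvStepA (st : List Int × List (Int × Int)) (p : Int × Char) : List Int × List (Int × Int) :=
  if p.2 = '{' then (st.1 ++ [p.1], st.2)
  else if p.2 = '}' ∧ st.1 ≠ [] then
    -- stack.pop(): last element; guard guarantees nonemptiness, so getLastD's default is never used
    let start := st.1.getLastD 0
    let stack' := st.1.dropLast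
    if stack' = [] then (stack', st.2 ++ [(start, p.1)]) else (stack', st.2)
  else st

def extract_nested_brackets (s : String) : List (Int × Int) :=
  ((PySem.List.enumerate s.toList).foldl pvStepA ([], [])).2

-- ===== PORT B =====
-- Source B's close_of(i, depth): the Python index loop 'while i < len(s)' over absolute
-- indices is transcribed as structural recursion on the suffix of s starting at i,
-- carrying the absolute index; it also returns the suffix after the matching '}'
-- (Python resumes there by index arithmetic).  Exact on all inputs.
def pvCloseOf : List Char → Int → Int → Option (Int × List Char)
  | [], _, _ => none
  | c :: rest, i, depth =>
    if c = '{' then pvCloseOf rest (i + 1) (depth + 1)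
    else if c = '}' then
      if depth - 1 = 0 then some (i, rest) else pvCloseOf rest (i + 1) (depth - 1)
    else pvCloseOf rest (i + 1) depth

-- s.find('{', k): hand port of the single-character find as a scan of the suffix at k
-- carrying the absolute index (None = Python's -1); exact for a one-character needle.
def pvFindOpen : List Char → Int → Option (Int × List Char)
  | [], _ => none
  | c :: rest, i => if c = '{' then some (i, rest) else pvFindOpen rest (i + 1)

-- termination facts for the outer loop (the port cites them in decreasing_by)
theorem pvCloseOf_length : ∀ (l : List Char) (i depth : Int) (e : Int) (r : List Char),
    pvCloseOf l i depth = some (e, r) → r.length < l.length := by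
  intro l
  induction l with
  | nil => intro i depth e r h; simp [pvCloseOf] at h
  | cons c rest ih =>
    intro i depth e r h
    simp only [pvCloseOf] at h
    split_ifs at h with h1 h2 h3
    · exact Nat.lt_succ_of_lt (ih _ _ _ _ h)
    · cases h; simp
    · exact Nat.lt_succ_of_lt (ih _ _ _ _ h)
    · exact Nat.lt_succ_of_lt (ih _ _ _ _ h)

theorem pvFindOpen_length : ∀ (l : List Char) (i : Int) (e : Int) (r : List Char),
    pvFindOpen l i = some (e, r) → r.length < l.length := by
  intro l
  induction l with
  | nil => intro i e r h; simp [pvFindOpen] at h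
  | cons c rest ih =>
    intro i e r h
    simp only [pvFindOpen] at h
    split_ifs at h with h1
    · cases h; simp
    · exact Nat.lt_succ_of_lt (ih _ _ _ h)

-- the outer 'while pos != -1' loop of Source B
def pvOuterB (l : List Char) (i : Int) (acc : List (Int × Int)) : List (Int × Int) :=
  match hf : pvFindOpen l i with
  | none => acc
  | some (pos, rest) =>
    match hc : pvCloseOf rest (pos + 1) 1 with
    | none => acc
    | some (e, rest') => pvOuterB rest' (e + 1) (acc ++ [(pos, e)])
termination_by l.length
decreasing_by
  exact Nat.lt_trans (pvCloseOf_length _ _ _ _ _ hc) (pvFindOpen_length _ _ _ _ hf)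

def extract_nested_brackets_alt (s : String) : List (Int × Int) :=
  pvOuterB s.toList 0 []

-- ===== PRECONDITION & SPEC =====
def Spec_extract_nested_brackets (s : String) (out : List (Int × Int)) : Prop := out = extract_nested_brackets_alt s
instance (s : String) (out : List (Int × Int)) : Decidable (Spec_extract_nested_brackets s out) := by unfold Spec_extract_nested_brackets; infer_instance

-- ===== CLAIM (what is proved, stated in full; the proofs are below) =====
def Claim_equal_extract_nested_brackets : Prop := ∀ (s : String), Dom_extract_nested_brackets s → Spec_extract_nested_brackets s (extract_nested_brackets s)

-- ===== LEMMAS AND PROOFS =====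

-- While A's stack is b :: tl (bottom b, height tl.length+1), its fold behaves like
-- pvCloseOf with depth = tl.length+1: if the depth never returns to 0 the results are
-- unchanged, and if it returns to 0 at index e, A appends (b, e) and continues empty.
theorem pv_inner : ∀ (l : List Char) (i : Int) (b : Int) (tl : List Int) (acc : List (Int × Int)),
    ((PySem.List.enumerate l i).foldl pvStepA (b :: tl, acc)).2 =
      match pvCloseOf l i ((tl.length : Int) + 1) with
      | none => acc
      | some (e, rest') => ((PySem.List.enumerate rest' (e + 1)).foldl pvStepA ([], acc ++ [(b, e)])).2 := by
  intro l
  induction l with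
  | nil => intro i b tl acc; simp [PySem.List.enumerate_nil, pvCloseOf]
  | cons c rest ih =>
    intro i b tl acc
    rw [PySem.List.enumerate_cons, List.foldl_cons]
    by_cases h1 : c = '{'
    · -- push: stack becomes b :: (tl ++ [i])
      have hs : pvStepA (b :: tl, acc) (i, c) = (b :: (tl ++ [i]), acc) := by
        simp [pvStepA, h1]
      rw [hs]
      have := ih (i + 1) b (tl ++ [i]) acc
      rw [this]
      have hlen : (((tl ++ [i]).length : Int) + 1) = ((tl.length : Int) + 1) + 1 := by
        simp
      rw [hlen]
      simp only [pvCloseOf, if_pos h1]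
    · by_cases h2 : c = '}'
      · rcases tl with _ | ⟨t, tl2⟩
        · -- stack [b]: pop to empty, append (b, i)
          have hs : pvStepA ([b], acc) (i, c) = ([], acc ++ [(b, i)]) := by
            simp [pvStepA, h2]
          rw [hs]
          simp only [pvCloseOf, if_neg h1, if_pos h2]
          norm_num
        · -- stack height ≥ 2: pop last, bottom still b
          have hs : pvStepA (b :: t :: tl2, acc) (i, c) = ((b :: t :: tl2).dropLast, acc) := by
            simp [pvStepA, h2]
          rw [hs, List.dropLast_cons₂]
          have := ih (i + 1) b (t :: tl2).dropLast acc
          have hd : (((t :: tl2).dropLast.length : Int) + 1) = ((t :: tl2).length : Int) := by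
            simp
          rw [hd] at this
          rw [this]
          simp only [pvCloseOf, if_neg h1, if_pos h2]
          have hnz : ¬ (((t :: tl2).length : Int) + 1 - 1 = 0) := by omega
          rw [if_neg hnz]
          have harith : ((t :: tl2).length : Int) + 1 - 1 = ((t :: tl2).length : Int) := by ring
          rw [harith]
      · have hs : pvStepA (b :: tl, acc) (i, c) = (b :: tl, acc) := by
          simp [pvStepA, h1, h2]
        rw [hs, ih (i + 1) b tl acc]
        simp only [pvCloseOf, if_neg h1, if_neg h2]

-- unfolding lemmas for pvOuterB (the named-match definition resists direct simp)
theorem pvOuterB_none (l : List Char) (i : Int) (acc : List (Int × Int))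
    (h : pvFindOpen l i = none) : pvOuterB l i acc = acc := by
  rw [pvOuterB]
  split
  · rfl
  · rename_i pos r heq; rw [h] at heq; cases heq

theorem pvOuterB_some_none (l : List Char) (i : Int) (acc : List (Int × Int))
    (pos : Int) (rest : List Char)
    (h : pvFindOpen l i = some (pos, rest)) (h2 : pvCloseOf rest (pos + 1) 1 = none) :
    pvOuterB l i acc = acc := by
  rw [pvOuterB]
  split
  · rfl
  · rename_i pos' r heq
    rw [h] at heq
    cases heq
    split
    · rfl
    · rename_i e' r' hcc; rw [h2] at hcc; cases hcc

theorem pvOuterB_some_some (l : List Char) (i : Int) (acc : List (Int × Int))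
    (pos : Int) (rest : List Char) (e : Int) (rest' : List Char)
    (h : pvFindOpen l i = some (pos, rest)) (h2 : pvCloseOf rest (pos + 1) 1 = some (e, rest')) :
    pvOuterB l i acc = pvOuterB rest' (e + 1) (acc ++ [(pos, e)]) := by
  rw [pvOuterB]
  split
  · rename_i heq; rw [h] at heq; cases heq
  · rename_i pos' r heq
    rw [h] at heq
    cases heq
    split
    · rename_i hcc; rw [h2] at hcc; cases hcc
    · rename_i e' r' hcc
      rw [h2] at hcc
      cases hcc
      rfl

theorem pvOuterB_skip (c : Char) (rest : List Char) (i : Int) (acc : List (Int × Int))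
    (h1 : c ≠ '{') : pvOuterB (c :: rest) i acc = pvOuterB rest (i + 1) acc := by
  have hf : pvFindOpen (c :: rest) i = pvFindOpen rest (i + 1) := by
    simp [pvFindOpen, h1]
  rcases ho : pvFindOpen rest (i + 1) with _ | ⟨pos, r⟩
  · rw [pvOuterB_none _ _ _ (hf.trans ho), pvOuterB_none _ _ _ ho]
  · rcases hc : pvCloseOf r (pos + 1) 1 with _ | ⟨e, r'⟩
    · rw [pvOuterB_some_none _ _ _ _ _ (hf.trans ho) hc, pvOuterB_some_none _ _ _ _ _ ho hc]
    · rw [pvOuterB_some_some _ _ _ _ _ _ _ (hf.trans ho) hc, pvOuterB_some_some _ _ _ _ _ _ _ ho hc]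

-- From an empty stack, A's fold from index i equals B's outer loop.
theorem pv_outer : ∀ (n : Nat) (l : List Char), l.length ≤ n → ∀ (i : Int) (acc : List (Int × Int)),
    ((PySem.List.enumerate l i).foldl pvStepA ([], acc)).2 = pvOuterB l i acc := by
  intro n
  induction n with
  | zero =>
    intro l hl i acc
    have : l = [] := List.length_eq_zero_iff.mp (Nat.le_zero.mp hl)
    subst this
    rw [pvOuterB_none _ _ _ (by simp [pvFindOpen])]
    simp [PySem.List.enumerate_nil]
  | succ m ih =>
    intro l hl i acc
    rcases l with _ | ⟨c, rest⟩
    · rw [pvOuterB_none _ _ _ (by simp [pvFindOpen])]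
      simp [PySem.List.enumerate_nil]
    · rw [PySem.List.enumerate_cons, List.foldl_cons]
      by_cases h1 : c = '{'
      · -- found an open at i: A pushes [i]; B matches its close
        have hs : pvStepA (([] : List Int), acc) (i, c) = ([i], acc) := by
          simp [pvStepA, h1]
        rw [hs]
        have hfind : pvFindOpen (c :: rest) i = some (i, rest) := by
          simp [pvFindOpen, h1]
        have hin := pv_inner rest (i + 1) i [] acc
        norm_num at hin
        rcases hc : pvCloseOf rest (i + 1) 1 with _ | ⟨e, rest'⟩
        · simp only [hc] at hin
          rw [hin, pvOuterB_some_none _ _ _ _ _ hfind hc]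
        · simp only [hc] at hin
          have hr : rest'.length ≤ m := by
            have := pvCloseOf_length rest (i + 1) 1 e rest' hc
            simp at hl; omega
          rw [hin, ih rest' hr (e + 1) (acc ++ [(i, e)]),
            pvOuterB_some_some _ _ _ _ _ _ _ hfind hc]
      · -- no open here: both skip the character
        have hs : pvStepA (([] : List Int), acc) (i, c) = ([], acc) := by
          simp [pvStepA, h1]
        rw [hs, ih rest (by simp at hl; omega) (i + 1) acc, pvOuterB_skip c rest i acc h1]

-- ===== VERDICT (by name: the statement is the Claim_ definition above) =====
theorem extract_nested_brackets_spec : Claim_equal_extract_nested_brackets := by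
  intro s _
  unfold Spec_extract_nested_brackets extract_nested_brackets extract_nested_brackets_alt
  exact pv_outer s.toList.length s.toList le_rfl 0 []
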